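-- pv_equiv track=rewrite | github.com/matangover/abjad | trunk/abjad/tools/mathtools/get_shared_numeric_sign.py | get_shared_numeric_sign
-- ===== SOURCE A (Python) =====
-- def get_shared_numeric_sign(sequence):
--    '''Return ``1`` when all `sequence` elements are positive::
--
--       abjad> mathtools.get_shared_numeric_sign([1, 2, 3])
--       1
--
--    Return ``-1`` when all `sequence` elements are negative::
--
--       abjad> mathtools.get_shared_numeric_sign([-1, -2, -3])
--       -1
--
--    Return ``0`` on empty `sequence`::
--
--       abjad> mathtools.get_shared_numeric_sign([ ])
--       0
--
--    Otherwise return none::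
--
--       abjad> mathtools.get_shared_numeric_sign([1, 2, -3]) is None
--       True
--
--    Return ``1``, ``-1``, ``0`` or none.
--
--    .. versionchanged:: 1.1.2
--       renamed ``seqtools.sign( )`` to
--       ``mathtools.get_shared_numeric_sign( )``.
--    '''
--
--    if len(sequence) == 0:
--       return 0
--    elif all([0 < x for x in sequence]):
--       return 1
--    elif all([x < 0 for x in sequence]):
--       return -1
--    else:
--       return None
-- ===== SOURCE B (Python) =====
-- def get_shared_numeric_sign(sequence):
--     if len(sequence) == 0:
--         return 0
--     signs = {(x > 0) - (x < 0) for x in sequence}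
--     if signs == {1}:
--         return 1
--     if signs == {-1}:
--         return -1
--     return None
-- ===== Notes on version B (the rewrite author's own statement) =====
-- stated objective: simpler
-- what changed: Instead of two separate all() scans over fresh comparison lists, B builds one set of element signs in a single pass and branches on set equality with {1}/{-1}.
import Mathlib
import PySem

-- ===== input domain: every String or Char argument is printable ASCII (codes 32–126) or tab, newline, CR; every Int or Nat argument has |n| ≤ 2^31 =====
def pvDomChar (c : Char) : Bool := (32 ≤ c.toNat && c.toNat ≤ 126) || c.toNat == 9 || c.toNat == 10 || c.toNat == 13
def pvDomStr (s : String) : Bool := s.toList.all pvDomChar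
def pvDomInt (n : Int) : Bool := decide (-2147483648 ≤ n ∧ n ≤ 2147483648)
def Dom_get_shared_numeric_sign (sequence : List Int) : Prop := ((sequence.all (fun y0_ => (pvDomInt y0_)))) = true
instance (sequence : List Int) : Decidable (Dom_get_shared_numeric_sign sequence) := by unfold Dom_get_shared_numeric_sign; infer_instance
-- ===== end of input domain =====

-- B replaces A's two all() scans by one set of element signs compared against {1}/{-1} (simpler, same cost).

-- ===== PORT A =====
def get_shared_numeric_sign (sequence : List Int) : Option Int :=
  if sequence.length = 0 then some 0
  else if (sequence.map (fun x => decide (0 < x))).all id then some 1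
  else if (sequence.map (fun x => decide (x < 0))).all id then some (-1)
  else none

-- ===== PORT B =====
-- (x > 0) - (x < 0), bools as ints
def pySignB (x : Int) : Int := (if 0 < x then 1 else 0) - (if x < 0 then 1 else 0)

def get_shared_numeric_sign_alt (sequence : List Int) : Option Int :=
  if sequence.length = 0 then some 0
  else
    let signs : PySem.Set Int := PySem.Set.ofList (sequence.map pySignB)
    if PySem.Set.equal signs [1] then some 1
    else if PySem.Set.equal signs [-1] then some (-1)
    else none

-- ===== PRECONDITION & SPEC =====
def Spec_get_shared_numeric_sign (sequence : List Int) (out : Option Int) : Prop := out = get_shared_numeric_sign_alt sequence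
instance (sequence : List Int) (out : Option Int) : Decidable (Spec_get_shared_numeric_sign sequence out) := by unfold Spec_get_shared_numeric_sign; infer_instance

-- ===== CLAIM (what is proved, stated in full; the proofs are below) =====
def Claim_equal_get_shared_numeric_sign : Prop := ∀ (sequence : List Int), Dom_get_shared_numeric_sign sequence → Spec_get_shared_numeric_sign sequence (get_shared_numeric_sign sequence)

-- ===== LEMMAS AND PROOFS =====

theorem pySignB_eq_one (x : Int) : pySignB x = 1 ↔ 0 < x := by
  unfold pySignB; split_ifs <;> omega

theorem pySignB_eq_neg_one (x : Int) : pySignB x = -1 ↔ x < 0 := by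
  unfold pySignB; split_ifs <;> omega

theorem signs_equal_singleton (s : Int) (a : Int) (l : List Int) :
    PySem.Set.equal (PySem.Set.ofList ((a :: l).map pySignB)) [s] = true ↔
      ∀ y ∈ a :: l, pySignB y = s := by
  rw [PySem.Set.equal_iff]
  constructor
  · intro h y hy
    have := (h (pySignB y)).mp (by rw [PySem.Set.mem_ofList]; exact List.mem_map_of_mem hy)
    simpa using this
  · intro h x
    rw [PySem.Set.mem_ofList, List.mem_map]
    constructor
    · rintro ⟨y, hy, rfl⟩; simp [h y hy]
    · intro hx
      refine ⟨a, List.mem_cons_self, ?_⟩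
      simp at hx
      rw [hx]; exact h a List.mem_cons_self

theorem get_shared_numeric_sign_eq_alt (sequence : List Int) :
    get_shared_numeric_sign sequence = get_shared_numeric_sign_alt sequence := by
  cases sequence with
  | nil => rfl
  | cons a l =>
    unfold get_shared_numeric_sign get_shared_numeric_sign_alt
    simp only [List.length_cons, Nat.succ_ne_zero, if_false]
    have h1 : PySem.Set.equal (PySem.Set.ofList ((a :: l).map pySignB)) [1] = true ↔
        ∀ y ∈ a :: l, pySignB y = 1 := signs_equal_singleton 1 a l
    have h2 : PySem.Set.equal (PySem.Set.ofList ((a :: l).map pySignB)) [-1] = true ↔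
        ∀ y ∈ a :: l, pySignB y = -1 := signs_equal_singleton (-1) a l
    have ha : ((a :: l).map (fun x => decide (0 < x))).all id = true ↔
        ∀ y ∈ a :: l, pySignB y = 1 := by
      simp [List.all_eq_true, pySignB_eq_one]
    have hb : ((a :: l).map (fun x => decide (x < 0))).all id = true ↔
        ∀ y ∈ a :: l, pySignB y = -1 := by
      simp [List.all_eq_true, pySignB_eq_neg_one]
    by_cases c1 : ∀ y ∈ a :: l, pySignB y = 1
    · rw [if_pos (ha.mpr c1), if_pos (h1.mpr c1)]
    · rw [if_neg (fun h => c1 (ha.mp h)), if_neg (fun h => c1 (h1.mp h))]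
      by_cases c2 : ∀ y ∈ a :: l, pySignB y = -1
      · rw [if_pos (hb.mpr c2), if_pos (h2.mpr c2)]
      · rw [if_neg (fun h => c2 (hb.mp h)), if_neg (fun h => c2 (h2.mp h))]

-- ===== VERDICT (by name: the statement is the Claim_ definition above) =====
theorem get_shared_numeric_sign_spec : Claim_equal_get_shared_numeric_sign := by
  intro sequence _
  unfold Spec_get_shared_numeric_sign
  exact get_shared_numeric_sign_eq_alt sequence
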